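-- pv_equiv track=rewrite | github.com/Navy10021/CODE_is_ART | 5-2/prob_8.py | find_max_subseq_str
-- ===== SOURCE A (Python) =====
-- def find_subseq(S, char):
--     N = len(S)
--     res = 0     # store maximum length
--     for i in range(N):
--         if S[i] == char:
--             # increment res += 1
--             res += 1
--             # increment alphabet char
--             char = chr(ord(char) + 1)
--     return res
--
-- def find_max_subseq(S):
--     res = 0
--
--     for char in range(ord('a'), ord('z')+1):
--         res = max(res, find_subseq(S, chr(char)))
--
--     return res
--
-- def find_max_subseq_str(S):
--     arr = list(S)
--     start = ord(min(arr))
--     max_len = find_max_subseq(S)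
--     res = []
--     for i in range(max_len):
--         res.append(chr(start + i))
--     return "".join(res)
-- ===== SOURCE B (Python) =====
-- def find_max_subseq_str(S):
--     # One pass over S driving all 26 greedy scans in parallel:
--     # cnt[j] = matches so far of the chain that starts at chr(97+j);
--     # its current target character is chr(97 + j + cnt[j]).
--     cnt = [0] * 26
--     for x in S:
--         o = ord(x)
--         cnt = [c + 1 if 97 + j + c == o else c for j, c in enumerate(cnt)]
--     max_len = 0
--     for c in cnt:
--         max_len = max(max_len, c)
--     start = ord(min(S))
--     return "".join(chr(start + i) for i in range(max_len))
-- ===== Notes on version B (the rewrite author's own statement) =====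
-- stated objective: alternative
-- what changed: Replaces the 26 separate greedy rescans of S (one per start letter) by a single left-to-right pass that advances all 26 greedy counters in parallel, then takes their maximum; the helper functions disappear.
import Mathlib
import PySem

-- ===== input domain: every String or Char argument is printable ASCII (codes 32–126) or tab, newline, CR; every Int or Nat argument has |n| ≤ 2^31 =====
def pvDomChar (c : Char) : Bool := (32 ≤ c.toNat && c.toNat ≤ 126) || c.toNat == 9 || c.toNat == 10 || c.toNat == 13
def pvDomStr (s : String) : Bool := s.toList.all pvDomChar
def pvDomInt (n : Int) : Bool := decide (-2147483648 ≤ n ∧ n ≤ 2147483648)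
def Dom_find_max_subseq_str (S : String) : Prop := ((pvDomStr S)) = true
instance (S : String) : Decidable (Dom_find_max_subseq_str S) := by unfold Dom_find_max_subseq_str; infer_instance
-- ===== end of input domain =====

-- B replaces A's 26 separate greedy rescans of S by one left-to-right pass advancing all
-- 26 greedy counters in parallel (objective: alternative decomposition, same cost).

-- ===== PORT A =====
-- char is carried as its ord code; 'S[i] == char' is compared on codes (exact for chars).
def find_subseq (S : String) (char : Int) : Int :=
  let N : Int := (S.toList.length : Int)
  ((PySem.List.pyRange 0 N 1).foldl
    (fun (st : Int × Int) i =>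
      if ((PySem.List.pyGetD S.toList i 'a').toNat : Int) = st.2
      then (st.1 + 1, st.2 + 1) else st)
    (0, char)).1

def find_max_subseq (S : String) : Int :=
  (PySem.List.pyRange 97 123 1).foldl (fun res char => max res (find_subseq S char)) 0

def find_max_subseq_str (S : String) : String :=
  let arr := S.toList
  -- min(arr) raises ValueError on empty input: excluded by Pre_; .getD 0 is never used inside Pre_
  let start : Int := (((PySem.List.min? arr (fun c => c)).map (fun c => (c.toNat : Int))).getD 0)
  let max_len := find_max_subseq S
  let res : List Char :=
    (PySem.List.pyRange 0 max_len 1).foldl (fun acc i => acc ++ [Char.ofNat (start + i).toNat]) []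
  String.mk res

-- ===== PORT B =====
def find_max_subseq_str_alt (S : String) : String :=
  let cnt : List Int :=
    S.toList.foldl
      (fun (cnt : List Int) x =>
        let o : Int := (x.toNat : Int)
        (PySem.List.enumerate cnt 0).map
          (fun jc => if 97 + jc.1 + jc.2 = o then jc.2 + 1 else jc.2))
      (List.replicate 26 0)
  let max_len := cnt.foldl (fun m c => max m c) 0
  -- min(S) raises ValueError on empty input: excluded by Pre_
  let start : Int := (((PySem.List.min? S.toList (fun c => c)).map (fun c => (c.toNat : Int))).getD 0)
  String.mk ((List.range max_len.toNat).map (fun (i : Nat) => Char.ofNat (start + (i : Int)).toNat))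

-- ===== PRECONDITION & SPEC =====
-- Pre_ excludes only the empty string, on which A (min of an empty sequence) raises ValueError.
def Pre_find_max_subseq_str (S : String) : Prop := S ≠ ""
instance (S : String) : Decidable (Pre_find_max_subseq_str S) := by
  unfold Pre_find_max_subseq_str; infer_instance
def pvWitness_find_max_subseq_str : String := "abc"

def Spec_find_max_subseq_str (S : String) (out : String) : Prop := out = find_max_subseq_str_alt S
instance (S : String) (out : String) : Decidable (Spec_find_max_subseq_str S out) := by unfold Spec_find_max_subseq_str; infer_instance

-- ===== CLAIM (what is proved, stated in full; the proofs are below) =====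
def Claim_equal_find_max_subseq_str : Prop := ∀ (S : String), Dom_find_max_subseq_str S → Pre_find_max_subseq_str S → Spec_find_max_subseq_str S (find_max_subseq_str S)

-- ===== LEMMAS AND PROOFS =====

-- the greedy counter of the scan whose fixed start code is a, run over cs from count r
def pvRun (a : Int) (cs : List Char) (r : Int) : Int :=
  cs.foldl (fun r x => if a + r = (x.toNat : Int) then r + 1 else r) r

theorem pvRunA (cs : List Char) : ∀ (r a : Int),
    cs.foldl
      (fun (st : Int × Int) x =>
        if ((x.toNat : Int)) = st.2 then (st.1 + 1, st.2 + 1) else st)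
      (r, a + r)
    = (pvRun a cs r, a + pvRun a cs r) := by
  induction cs with
  | nil => intro r a; simp [pvRun]
  | cons x t ih =>
    intro r a
    rw [List.foldl_cons]
    by_cases h : a + r = (x.toNat : Int)
    · have hstep : pvRun a (x :: t) r = pvRun a t (r + 1) := by
        simp [pvRun, List.foldl_cons, h]
      rw [hstep, if_pos h.symm, show a + r + 1 = a + (r + 1) by ring, ih]
    · have hstep : pvRun a (x :: t) r = pvRun a t r := by
        simp [pvRun, List.foldl_cons, h]
      rw [hstep, if_neg (fun hh => h hh.symm), ih]

theorem find_subseq_eq_pvRun (S : String) (a : Int) :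
    find_subseq S a = pvRun a S.toList 0 := by
  simp only [find_subseq]
  rw [PySem.List.foldl_pyRange_zero_pyGetD' S.toList 'a'
      (fun (st : Int × Int) c =>
        if ((c.toNat : Int)) = st.2 then (st.1 + 1, st.2 + 1) else st) (0, a)]
  have := pvRunA S.toList 0 a
  rw [add_zero] at this
  rw [this]

theorem pvEnumRangeMap (n : Nat) (g : Nat → Int) (s : Int) :
    PySem.List.enumerate ((List.range n).map g) s
      = (List.range n).map (fun (j : Nat) => ((s + (j : Int), g j) : Int × Int)) := by
  induction n with
  | zero => simp
  | succ m ih =>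
    rw [List.range_succ, List.map_append, PySem.List.enumerate_append, ih]
    simp

theorem pvCntB (cs : List Char) : ∀ (g : Nat → Int),
    cs.foldl
      (fun (cnt : List Int) x =>
        (PySem.List.enumerate cnt 0).map
          (fun jc => if 97 + jc.1 + jc.2 = ((x.toNat : Int)) then jc.2 + 1 else jc.2))
      ((List.range 26).map g)
    = (List.range 26).map (fun (j : Nat) => pvRun (97 + (j : Int)) cs (g j)) := by
  induction cs with
  | nil => intro g; simp [pvRun]
  | cons x t ih =>
    intro g
    rw [List.foldl_cons, pvEnumRangeMap 26 g 0, List.map_map]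
    have hstep :
        ((List.range 26).map
          ((fun jc : Int × Int => if 97 + jc.1 + jc.2 = ((x.toNat : Int)) then jc.2 + 1 else jc.2)
            ∘ fun (j : Nat) => ((0 + (j : Int), g j) : Int × Int)))
        = (List.range 26).map
            (fun (j : Nat) => if 97 + (j : Int) + g j = ((x.toNat : Int)) then g j + 1 else g j) := by
      simp [Function.comp]
    rw [hstep, ih]
    apply List.map_congr_left
    intro j _
    by_cases h : 97 + (j : Int) + g j = ((x.toNat : Int))
    · rw [if_pos h]
      simp [pvRun, List.foldl_cons, h]
    · rw [if_neg h]
      simp [pvRun, List.foldl_cons, h]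

theorem pvListEq (start L : Int) :
    (PySem.List.pyRange 0 L 1).foldl (fun acc i => acc ++ [Char.ofNat (start + i).toNat]) []
    = (List.range L.toNat).map (fun (i : Nat) => Char.ofNat (start + (i : Int)).toNat) := by
  have hgen : ∀ (l : List Int) (acc : List Char),
      l.foldl (fun acc i => acc ++ [Char.ofNat (start + i).toNat]) acc
        = acc ++ l.map (fun i => Char.ofNat (start + i).toNat) := by
    intro l
    induction l with
    | nil => intro acc; simp
    | cons y t ih => intro acc; simp [List.foldl_cons, ih]
  rw [hgen, PySem.List.pyRange_one, List.map_map]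
  simp [Function.comp]

-- ===== VERDICT (by name: the statement is the Claim_ definition above) =====
theorem find_max_subseq_str_spec : Claim_equal_find_max_subseq_str := by
  intro S _ _
  unfold Spec_find_max_subseq_str find_max_subseq_str find_max_subseq_str_alt find_max_subseq
  have hrep : (List.replicate 26 (0 : Int)) = (List.range 26).map (fun _ => (0 : Int)) := by
    simp
  rw [hrep, pvCntB S.toList (fun _ => 0)]
  have hmax :
      (PySem.List.pyRange 97 123 1).foldl (fun res char => max res (find_subseq S char)) 0
        = ((List.range 26).map (fun (j : Nat) => pvRun (97 + (j : Int)) S.toList 0)).foldl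
            (fun m c => max m c) 0 := by
    rw [PySem.List.pyRange_one, List.foldl_map, List.foldl_map]
    simp only [find_subseq_eq_pvRun]
    rfl
  rw [hmax]
  simp only [pvListEq]
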